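-- pv_equiv track=rewrite | github.com/dmmortimer/AOC2023 | Day02/day02.py | minimum_set
-- ===== SOURCE A (Python) =====
-- def minimum_set(game_draws):
--     max_red = 0
--     max_green = 0
--     max_blue = 0
--
--     for draw in game_draws:
--         if draw[0]>max_red:
--             max_red = draw[0]
--         if draw[1]>max_green:
--             max_green = draw[1]
--         if draw[2]>max_blue:
--             max_blue = draw[2]
--     return (max_red,max_green,max_blue)
-- ===== SOURCE B (Python) =====
-- def minimum_set(game_draws):
--     # Column-wise maxima via three independent reductions; 0 included so an
--     # empty or all-negative column yields 0.
--     return tuple(max([0] + [draw[i] for draw in game_draws]) for i in range(3))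
-- ===== Notes on version B (the rewrite author's own statement) =====
-- stated objective: simpler
-- what changed: Replaces the single interleaved loop with three conditional accumulators by three independent column reductions: each component is max of [0] plus that column, computed in its own pass.
import Mathlib
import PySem

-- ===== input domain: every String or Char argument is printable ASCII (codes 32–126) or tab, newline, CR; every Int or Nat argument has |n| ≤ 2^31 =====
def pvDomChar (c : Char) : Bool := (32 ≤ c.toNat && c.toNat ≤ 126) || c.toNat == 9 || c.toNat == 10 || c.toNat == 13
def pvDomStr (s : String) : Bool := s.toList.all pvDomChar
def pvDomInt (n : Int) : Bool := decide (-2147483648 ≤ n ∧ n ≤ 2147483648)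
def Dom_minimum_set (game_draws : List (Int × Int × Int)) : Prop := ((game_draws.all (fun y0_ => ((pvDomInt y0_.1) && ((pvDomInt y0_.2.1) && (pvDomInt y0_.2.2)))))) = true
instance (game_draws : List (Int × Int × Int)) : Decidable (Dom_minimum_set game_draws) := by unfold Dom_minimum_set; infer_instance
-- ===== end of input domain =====

-- B computes each column's maximum by an independent reduction (max of 0 and the column)
-- instead of A's single interleaved loop with three conditional accumulators; objective: simpler.

-- ===== PORT A =====
-- one pass, three accumulators updated by conditional assignment
def minimum_set (game_draws : List (Int × Int × Int)) : Int × Int × Int :=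
  game_draws.foldl
    (fun acc draw =>
      let mr := if draw.1 > acc.1 then draw.1 else acc.1
      let mg := if draw.2.1 > acc.2.1 then draw.2.1 else acc.2.1
      let mb := if draw.2.2 > acc.2.2 then draw.2.2 else acc.2.2
      (mr, mg, mb))
    (0, 0, 0)

-- ===== PORT B =====
-- max([0] + [draw[i] for draw in game_draws]) for each of the three columns
def pvColMax (xs : List Int) : Int := ((0 : Int) :: xs).foldl max 0
def minimum_set_alt (game_draws : List (Int × Int × Int)) : Int × Int × Int :=
  (pvColMax (game_draws.map (·.1)),
   pvColMax (game_draws.map (·.2.1)),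
   pvColMax (game_draws.map (·.2.2)))

-- ===== PRECONDITION & SPEC =====
def Spec_minimum_set (game_draws : List (Int × Int × Int)) (out : Int × Int × Int) : Prop := out = minimum_set_alt game_draws
instance (game_draws : List (Int × Int × Int)) (out : Int × Int × Int) : Decidable (Spec_minimum_set game_draws out) := by unfold Spec_minimum_set; infer_instance

-- ===== CLAIM (what is proved, stated in full; the proofs are below) =====
def Claim_equal_minimum_set : Prop := ∀ (game_draws : List (Int × Int × Int)), Dom_minimum_set game_draws → Spec_minimum_set game_draws (minimum_set game_draws)

-- ===== LEMMAS AND PROOFS =====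

-- A's fold from arbitrary accumulators equals the three column folds started there.
theorem minimum_set_foldl (game_draws : List (Int × Int × Int)) (r g b : Int) :
    game_draws.foldl
      (fun acc draw =>
        let mr := if draw.1 > acc.1 then draw.1 else acc.1
        let mg := if draw.2.1 > acc.2.1 then draw.2.1 else acc.2.1
        let mb := if draw.2.2 > acc.2.2 then draw.2.2 else acc.2.2
        (mr, mg, mb))
      (r, g, b)
    = ((game_draws.map (·.1)).foldl max r,
       (game_draws.map (·.2.1)).foldl max g,
       (game_draws.map (·.2.2)).foldl max b) := by
  induction game_draws generalizing r g b with
  | nil => rfl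
  | cons d t ih =>
      have hstep : ∀ x y : Int, (if y > x then y else x) = max x y := by
        intro x y; simp [max_def]; split_ifs <;> omega
      simp only [List.foldl_cons, List.map_cons]
      rw [hstep, hstep, hstep]
      exact ih _ _ _

-- ===== VERDICT (by name: the statement is the Claim_ definition above) =====
theorem minimum_set_spec : Claim_equal_minimum_set := by
  intro game_draws _
  unfold Spec_minimum_set minimum_set minimum_set_alt pvColMax
  rw [minimum_set_foldl]
  simp
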